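-- pv_equiv track=rewrite | github.com/nivetha-elan/CyberInsights_AI | genai3.py | analyze_reports
-- ===== SOURCE A (Python) =====
-- def classify_risk(content):
--     high_risk_keywords = [
--         "critical", "severe", "high risk", "breach", "compromise", "unauthorized access",
--         "exploitation", "major vulnerability", "data exfiltration", "incident", "unpatched", "unmitigated"
--     ]
--     medium_risk_keywords = [
--         "moderate", "medium risk", "potential vulnerability", "exposure", "configuration issues",
--         "insecure protocols", "firewall misconfiguration", "audit finding", "password weaknesses"
--     ]
--     low_risk_keywords = [
--         "low risk", "minor", "non-critical", "low priority", "compliance gap", "misconfigured settings",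
--         "isolated incident", "best practices not followed", "limited vulnerability"
--     ]
--
--     content_lower = content.lower()
--
--     if any(word in content_lower for word in high_risk_keywords):
--         return 'High'
--     elif any(word in content_lower for word in medium_risk_keywords):
--         return 'Medium'
--     elif any(word in content_lower for word in low_risk_keywords):
--         return 'Low'
--     else:
--         return 'No Risk Detected'
--
-- def analyze_reports(texts, file_names):
--     detailed_results = []
--     total_risks = {'Low': 0, 'Medium': 0, 'High': 0, 'No Risk Detected': 0}
--
--     for i, text in enumerate(texts):
--         risk_level = classify_risk(text)
--         detailed_results.append({
--             'PDF Name': file_names[i],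
--             'Risk Detected': 'Yes' if risk_level in ['Low', 'Medium', 'High'] else 'No',
--             'Risk Level': risk_level
--         })
--         total_risks[risk_level] += 1
--
--     return detailed_results, total_risks
-- ===== SOURCE B (Python) =====
-- # Flat keyword->rank index with a running-minimum scan instead of three ordered
-- # any() groups; counts kept in a rank-indexed array and the dict assembled once.
-- RISK_GROUPS = [
--     ["critical", "severe", "high risk", "breach", "compromise", "unauthorized access",
--      "exploitation", "major vulnerability", "data exfiltration", "incident", "unpatched", "unmitigated"],
--     ["moderate", "medium risk", "potential vulnerability", "exposure", "configuration issues",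
--      "insecure protocols", "firewall misconfiguration", "audit finding", "password weaknesses"],
--     ["low risk", "minor", "non-critical", "low priority", "compliance gap", "misconfigured settings",
--      "isolated incident", "best practices not followed", "limited vulnerability"],
-- ]
-- KEYWORD_RANK = [(kw, r) for r, kws in enumerate(RISK_GROUPS) for kw in kws]
-- LEVELS = ("High", "Medium", "Low")
--
-- def _classify_rank(content):
--     cl = content.lower()
--     best = 3
--     for kw, r in KEYWORD_RANK:
--         if r < best and kw in cl:
--             best = r
--     return best
--
-- def analyze_reports(texts, file_names):
--     counts = [0, 0, 0, 0]
--     detailed_results = []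
--     for name, text in zip(file_names, texts):
--         r = _classify_rank(text)
--         counts[r] += 1
--         detailed_results.append({
--             'PDF Name': name,
--             'Risk Detected': 'Yes' if r < 3 else 'No',
--             'Risk Level': LEVELS[r] if r < 3 else 'No Risk Detected'
--         })
--     total_risks = {'Low': counts[2], 'Medium': counts[1], 'High': counts[0], 'No Risk Detected': counts[3]}
--     return detailed_results, total_risks
-- ===== Notes on version B (the rewrite author's own statement) =====
-- stated objective: alternative
-- what changed: classify_risk's three ordered any() groups with early return become one flat keyword->rank index scanned with a running minimum whose 'r < best' guard skips the substring test for every keyword that cannot improve the current best rank, and analyze_reports replaces enumerate+file_names[i] and per-key dict increments with zip iteration, a rank-indexed counts array, and the totals dict assembled once at the end.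
import Mathlib
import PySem

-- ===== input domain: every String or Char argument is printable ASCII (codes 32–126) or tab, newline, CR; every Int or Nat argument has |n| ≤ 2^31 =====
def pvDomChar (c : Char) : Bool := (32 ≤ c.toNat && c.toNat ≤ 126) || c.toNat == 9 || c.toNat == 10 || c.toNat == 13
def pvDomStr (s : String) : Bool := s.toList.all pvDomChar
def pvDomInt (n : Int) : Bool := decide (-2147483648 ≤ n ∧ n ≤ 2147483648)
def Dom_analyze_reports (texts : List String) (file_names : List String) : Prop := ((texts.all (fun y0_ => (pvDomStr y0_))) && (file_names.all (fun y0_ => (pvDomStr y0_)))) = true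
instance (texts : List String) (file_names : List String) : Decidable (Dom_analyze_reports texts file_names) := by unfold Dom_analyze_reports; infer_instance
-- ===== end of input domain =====

-- B replaces the three ordered any() keyword groups by one flat keyword->rank index
-- scanned with a running minimum, and the dict-increment loop by a rank-indexed counts
-- array with the totals dict assembled once; alternative decomposition, same cost.


-- ===== PORT A =====
def highKw : List String := ["critical", "severe", "high risk", "breach", "compromise", "unauthorized access", "exploitation", "major vulnerability", "data exfiltration", "incident", "unpatched", "unmitigated"]
def mediumKw : List String := ["moderate", "medium risk", "potential vulnerability", "exposure", "configuration issues", "insecure protocols", "firewall misconfiguration", "audit finding", "password weaknesses"]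
def lowKw : List String := ["low risk", "minor", "non-critical", "low priority", "compliance gap", "misconfigured settings", "isolated incident", "best practices not followed", "limited vulnerability"]

def classify_risk (content : String) : String :=
  let content_lower := PySem.Str.lower content
  if highKw.any (fun w => PySem.Str.isIn w content_lower) then "High"
  else if mediumKw.any (fun w => PySem.Str.isIn w content_lower) then "Medium"
  else if lowKw.any (fun w => PySem.Str.isIn w content_lower) then "Low"
  else "No Risk Detected"

-- the body of A's for-loop (file_names[i] is in range for every i under Pre_; pyGetD's default is never used there)
def stepA (file_names : List String) (st : List (List (String × String)) × PySem.Dict String Int) (p : Int × String) : List (List (String × String)) × PySem.Dict String Int :=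
  let risk_level := classify_risk p.2
  (st.1 ++ [[("PDF Name", PySem.List.pyGetD file_names p.1 ""),
             ("Risk Detected", if risk_level ∈ (["Low", "Medium", "High"] : List String) then "Yes" else "No"),
             ("Risk Level", risk_level)]],
   st.2.modify risk_level 0 (· + 1))

def analyze_reports (texts : List String) (file_names : List String) : (List (List (String × String))) × (List (String × Int)) :=
  let res := (PySem.List.enumerate texts 0).foldl (stepA file_names)
    ([], PySem.Dict.ofList [("Low", (0 : Int)), ("Medium", 0), ("High", 0), ("No Risk Detected", 0)])
  (res.1, res.2.items)

-- ===== PORT B =====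
-- KEYWORD_RANK of Source B: the flat keyword -> rank index (High=0, Medium=1, Low=2)
def kwRank : List (String × Int) :=
  (highKw.map (fun k => (k, (0 : Int)))) ++ (mediumKw.map (fun k => (k, 1))) ++ (lowKw.map (fun k => (k, 2)))

-- body of _classify_rank's for-loop
def rankStep (cl : String) (best : Int) (p : String × Int) : Int :=
  if p.2 < best ∧ PySem.Str.isIn p.1 cl then p.2 else best

def classify_rank (content : String) : Int :=
  let cl := PySem.Str.lower content
  kwRank.foldl (rankStep cl) 3

-- body of analyze_reports' for-loop in Source B; counts[r] += 1 and LEVELS[r] always index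
-- in range (r ∈ {0,1,2,3}), so set/getD with r.toNat are exact here
def stepB (st : List (List (String × String)) × List Int) (p : String × String) : List (List (String × String)) × List Int :=
  let r := classify_rank p.2
  (st.1 ++ [[("PDF Name", p.1),
             ("Risk Detected", if r < 3 then "Yes" else "No"),
             ("Risk Level", if r < 3 then (["High", "Medium", "Low"] : List String).getD r.toNat "" else "No Risk Detected")]],
   st.2.set r.toNat (st.2.getD r.toNat 0 + 1))

def analyze_reports_alt (texts : List String) (file_names : List String) : (List (List (String × String))) × (List (String × Int)) :=
  let res := (file_names.zip texts).foldl stepB ([], [0, 0, 0, 0])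
  (res.1, [("Low", res.2.getD 2 0), ("Medium", res.2.getD 1 0), ("High", res.2.getD 0 0), ("No Risk Detected", res.2.getD 3 0)])

-- ===== PRECONDITION & SPEC =====
-- Pre_ excludes exactly the inputs where A raises IndexError: file_names shorter than texts.
def Pre_analyze_reports (texts : List String) (file_names : List String) : Prop := texts.length ≤ file_names.length
instance (texts : List String) (file_names : List String) : Decidable (Pre_analyze_reports texts file_names) := by unfold Pre_analyze_reports; infer_instance
def pvWitness_analyze_reports : List String × List String := (["a critical bug", "fine"], ["r1.pdf", "r2.pdf"])

def Spec_analyze_reports (texts : List String) (file_names : List String) (out : (List (List (String × String))) × (List (String × Int))) : Prop := out = analyze_reports_alt texts file_names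
instance (texts : List String) (file_names : List String) (out : (List (List (String × String))) × (List (String × Int))) : Decidable (Spec_analyze_reports texts file_names out) := by unfold Spec_analyze_reports; infer_instance

-- ===== CLAIM (what is proved, stated in full; the proofs are below) =====
def Claim_equal_analyze_reports : Prop := ∀ (texts : List String) (file_names : List String), Dom_analyze_reports texts file_names → Pre_analyze_reports texts file_names → Spec_analyze_reports texts file_names (analyze_reports texts file_names)

-- ===== LEMMAS AND PROOFS =====

theorem classify_cases (c : String) :
    classify_risk c = "High" ∨ classify_risk c = "Medium" ∨ classify_risk c = "Low" ∨
      classify_risk c = "No Risk Detected" := by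
  unfold classify_risk
  dsimp only
  split_ifs <;> simp

-- B's running-minimum scan over one constant-rank keyword group
theorem fold_const (cl : String) (r : Int) (kws : List String) (b : Int) :
    (kws.map (fun k => (k, r))).foldl (rankStep cl) b
      = if r < b ∧ kws.any (fun w => PySem.Str.isIn w cl) then r else b := by
  induction kws generalizing b with
  | nil => simp
  | cons k kws ih =>
    simp only [List.map_cons, List.foldl_cons, rankStep, List.any_cons]
    rw [ih]
    by_cases hk : PySem.Str.isIn k cl = true <;>
      by_cases ha : kws.any (fun w => PySem.Str.isIn w cl) = true <;>
        by_cases hb : r < b <;>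
          simp only [hk, ha, hb, Bool.or_eq_true, lt_self_iff_false, true_and, false_and,
            and_true, and_false, true_or, false_or, or_true, or_false, and_self,
            if_true, if_false, not_true, not_false_iff, eq_self_iff_true, ite_true, ite_false,
            ite_self, Bool.false_eq_true, Bool.true_eq_false] <;> first | rfl | omega

-- B's flat scan computes the if-chain over the three group matches
theorem classify_rank_chain (c : String) :
    classify_rank c =
      (if highKw.any (fun w => PySem.Str.isIn w (PySem.Str.lower c)) then 0
       else if mediumKw.any (fun w => PySem.Str.isIn w (PySem.Str.lower c)) then 1
       else if lowKw.any (fun w => PySem.Str.isIn w (PySem.Str.lower c)) then 2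
       else 3) := by
  unfold classify_rank kwRank
  dsimp only
  rw [List.foldl_append, List.foldl_append, fold_const, fold_const, fold_const]
  cases highKw.any (fun w => PySem.Str.isIn w (PySem.Str.lower c)) <;>
    cases mediumKw.any (fun w => PySem.Str.isIn w (PySem.Str.lower c)) <;>
      cases lowKw.any (fun w => PySem.Str.isIn w (PySem.Str.lower c)) <;> simp

-- the rank of B is the level of A
theorem corr (c : String) :
    (classify_rank c = 0 ∧ classify_risk c = "High") ∨
    (classify_rank c = 1 ∧ classify_risk c = "Medium") ∨
    (classify_rank c = 2 ∧ classify_risk c = "Low") ∨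
    (classify_rank c = 3 ∧ classify_risk c = "No Risk Detected") := by
  rw [classify_rank_chain]
  unfold classify_risk
  dsimp only
  split_ifs <;> simp

theorem modL (dL dM dH dN : Int) : (PySem.Dict.mk [("Low", dL), ("Medium", dM), ("High", dH), ("No Risk Detected", dN)]).modify "Low" 0 (· + 1) = PySem.Dict.mk [("Low", dL + 1), ("Medium", dM), ("High", dH), ("No Risk Detected", dN)] := rfl
theorem modM (dL dM dH dN : Int) : (PySem.Dict.mk [("Low", dL), ("Medium", dM), ("High", dH), ("No Risk Detected", dN)]).modify "Medium" 0 (· + 1) = PySem.Dict.mk [("Low", dL), ("Medium", dM + 1), ("High", dH), ("No Risk Detected", dN)] := rfl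
theorem modH (dL dM dH dN : Int) : (PySem.Dict.mk [("Low", dL), ("Medium", dM), ("High", dH), ("No Risk Detected", dN)]).modify "High" 0 (· + 1) = PySem.Dict.mk [("Low", dL), ("Medium", dM), ("High", dH + 1), ("No Risk Detected", dN)] := rfl
theorem modN (dL dM dH dN : Int) : (PySem.Dict.mk [("Low", dL), ("Medium", dM), ("High", dH), ("No Risk Detected", dN)]).modify "No Risk Detected" 0 (· + 1) = PySem.Dict.mk [("Low", dL), ("Medium", dM), ("High", dH), ("No Risk Detected", dN + 1)] := rfl

theorem stepA_eval (fns : List String) (acc : List (List (String × String))) (d : PySem.Dict String Int) (i : Int) (t : String) :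
    stepA fns (acc, d) (i, t)
      = (acc ++ [[("PDF Name", PySem.List.pyGetD fns i ""),
                  ("Risk Detected", if classify_risk t ∈ (["Low", "Medium", "High"] : List String) then "Yes" else "No"),
                  ("Risk Level", classify_risk t)]],
         d.modify (classify_risk t) 0 (· + 1)) := rfl

set_option maxRecDepth 2048 in
set_option maxHeartbeats 1000000 in
theorem loopA_eq (ts : List String) (fns : List String) (s : Nat)
    (hs : s + ts.length ≤ fns.length)
    (acc : List (List (String × String))) (dL dM dH dN : Int) :
    (PySem.List.enumerate ts (s : Int)).foldl (stepA fns)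
      (acc, PySem.Dict.mk [("Low", dL), ("Medium", dM), ("High", dH), ("No Risk Detected", dN)])
    = (acc ++ ((fns.drop s).zip (ts.map classify_risk)).map (fun p =>
        [("PDF Name", p.1),
         ("Risk Detected", if p.2 = "No Risk Detected" then "No" else "Yes"),
         ("Risk Level", p.2)]),
       PySem.Dict.mk [("Low", dL + ((ts.map classify_risk).count "Low" : Int)),
                      ("Medium", dM + ((ts.map classify_risk).count "Medium" : Int)),
                      ("High", dH + ((ts.map classify_risk).count "High" : Int)),
                      ("No Risk Detected", dN + ((ts.map classify_risk).count "No Risk Detected" : Int))]) := by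
  induction ts generalizing s acc dL dM dH dN with
  | nil => simp [PySem.List.enumerate_nil]
  | cons t ts ih =>
    have hslt : s < fns.length := by simp at hs; omega
    rw [PySem.List.enumerate_cons]
    have hdrop : fns.drop s = fns[s] :: fns.drop (s + 1) := List.drop_eq_getElem_cons hslt
    simp only [List.foldl_cons, stepA_eval]
    have hget : PySem.List.pyGetD fns (s : Int) "" = fns[s] := by
      rw [PySem.List.pyGetD_natCast]
      exact List.getD_eq_getElem fns "" hslt
    rcases classify_cases t with h | h | h | h <;>
    · rw [show ((s : Int) + 1) = ((s + 1 : Nat) : Int) by push_cast; ring_nf]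
      show _ = _
      rw [h]
      simp only [modL, modM, modH, modN]
      rw [ih (s + 1) (by simp at hs ⊢; omega)]
      rw [hdrop]
      simp only [List.map_cons, List.zip_cons_cons, h, List.count_cons, hget, List.append_assoc,
        List.singleton_append, Prod.mk.injEq, PySem.Dict.mk.injEq, List.cons.injEq,
        List.append_cancel_left_eq]
      and_intros <;> first | trivial | skip
      all_goals simp
      all_goals omega

theorem stepB_eval0 (acc : List (List (String × String))) (c0 c1 c2 c3 : Int) (p : String × String) (h : classify_rank p.2 = 0) :
    stepB (acc, [c0, c1, c2, c3]) p
      = (acc ++ [[("PDF Name", p.1), ("Risk Detected", "Yes"), ("Risk Level", "High")]], [c0 + 1, c1, c2, c3]) := by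
  simp only [stepB, h]; rfl

theorem stepB_eval1 (acc : List (List (String × String))) (c0 c1 c2 c3 : Int) (p : String × String) (h : classify_rank p.2 = 1) :
    stepB (acc, [c0, c1, c2, c3]) p
      = (acc ++ [[("PDF Name", p.1), ("Risk Detected", "Yes"), ("Risk Level", "Medium")]], [c0, c1 + 1, c2, c3]) := by
  simp only [stepB, h]; rfl

theorem stepB_eval2 (acc : List (List (String × String))) (c0 c1 c2 c3 : Int) (p : String × String) (h : classify_rank p.2 = 2) :
    stepB (acc, [c0, c1, c2, c3]) p
      = (acc ++ [[("PDF Name", p.1), ("Risk Detected", "Yes"), ("Risk Level", "Low")]], [c0, c1, c2 + 1, c3]) := by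
  simp only [stepB, h]; rfl

theorem stepB_eval3 (acc : List (List (String × String))) (c0 c1 c2 c3 : Int) (p : String × String) (h : classify_rank p.2 = 3) :
    stepB (acc, [c0, c1, c2, c3]) p
      = (acc ++ [[("PDF Name", p.1), ("Risk Detected", "No"), ("Risk Level", "No Risk Detected")]], [c0, c1, c2, c3 + 1]) := by
  simp only [stepB, h]; rfl

theorem rowIf0 : (if (0 : Int) < 3 then (["High", "Medium", "Low"] : List String).getD (0 : Int).toNat "" else "No Risk Detected") = "High" := rfl
theorem rowIf1 : (if (1 : Int) < 3 then (["High", "Medium", "Low"] : List String).getD (1 : Int).toNat "" else "No Risk Detected") = "Medium" := rfl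
theorem rowIf2 : (if (2 : Int) < 3 then (["High", "Medium", "Low"] : List String).getD (2 : Int).toNat "" else "No Risk Detected") = "Low" := rfl
theorem rowIf3 : (if (3 : Int) < 3 then (["High", "Medium", "Low"] : List String).getD (3 : Int).toNat "" else "No Risk Detected") = "No Risk Detected" := rfl

theorem loopB_eq (ps : List (String × String)) (acc : List (List (String × String))) (c0 c1 c2 c3 : Int) :
    ps.foldl stepB (acc, [c0, c1, c2, c3])
      = (acc ++ ps.map (fun p =>
          [("PDF Name", p.1),
           ("Risk Detected", if classify_rank p.2 < 3 then "Yes" else "No"),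
           ("Risk Level", if classify_rank p.2 < 3 then (["High", "Medium", "Low"] : List String).getD (classify_rank p.2).toNat "" else "No Risk Detected")]),
         [c0 + (((ps.map Prod.snd).map classify_rank).count 0 : Int),
          c1 + (((ps.map Prod.snd).map classify_rank).count 1 : Int),
          c2 + (((ps.map Prod.snd).map classify_rank).count 2 : Int),
          c3 + (((ps.map Prod.snd).map classify_rank).count 3 : Int)]) := by
  induction ps generalizing acc c0 c1 c2 c3 with
  | nil => simp
  | cons p ps ih =>
    simp only [List.foldl_cons]
    rcases corr p.2 with ⟨h, _⟩ | ⟨h, _⟩ | ⟨h, _⟩ | ⟨h, _⟩ <;>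
      [rw [stepB_eval0 acc c0 c1 c2 c3 p h]; rw [stepB_eval1 acc c0 c1 c2 c3 p h];
       rw [stepB_eval2 acc c0 c1 c2 c3 p h]; rw [stepB_eval3 acc c0 c1 c2 c3 p h]] <;>
      rw [ih] <;>
      simp only [List.map_cons, List.count_cons, h, rowIf0, rowIf1, rowIf2, rowIf3,
        List.append_assoc, List.singleton_append] <;>
      norm_num <;>
      and_intros <;> first | rfl | (push_cast; omega)

-- per-row correspondence between A's level row and B's rank row
theorem rowEq (p : String × String) :
    [("PDF Name", p.1),
     ("Risk Detected", if classify_risk p.2 = "No Risk Detected" then "No" else "Yes"),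
     ("Risk Level", classify_risk p.2)]
    = [("PDF Name", p.1),
       ("Risk Detected", if classify_rank p.2 < 3 then "Yes" else "No"),
       ("Risk Level", if classify_rank p.2 < 3 then (["High", "Medium", "Low"] : List String).getD (classify_rank p.2).toNat "" else "No Risk Detected")] := by
  rcases corr p.2 with ⟨h1, h2⟩ | ⟨h1, h2⟩ | ⟨h1, h2⟩ | ⟨h1, h2⟩ <;> rw [h1, h2] <;>
    simp [List.getD]

theorem count_corr (k : String) (r : Int)
    (hk : ∀ c, classify_risk c = k ↔ classify_rank c = r) (ts : List String) :
    (ts.map classify_risk).count k = (ts.map classify_rank).count r := by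
  induction ts with
  | nil => rfl
  | cons t ts ih =>
    simp only [List.map_cons, List.count_cons, ih]
    by_cases h : classify_risk t = k
    · simp [h, (hk t).mp h]
    · have hne : ¬ classify_rank t = r := fun hr => h ((hk t).mpr hr)
      simp [h, hne]

-- ===== VERDICT (by name: the statement is the Claim_ definition above) =====

set_option maxRecDepth 4096 in
set_option maxHeartbeats 2000000 in
theorem analyze_reports_spec : Claim_equal_analyze_reports := by
  intro ts fns _ hpre
  have hlen : ts.length ≤ fns.length := hpre
  unfold Spec_analyze_reports analyze_reports analyze_reports_alt
  dsimp only
  rw [show PySem.Dict.ofList [("Low", (0 : Int)), ("Medium", 0), ("High", 0), ("No Risk Detected", 0)] = PySem.Dict.mk [("Low", (0 : Int)), ("Medium", 0), ("High", 0), ("No Risk Detected", 0)] from rfl]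
  rw [show ((0 : Int) = ((0 : Nat) : Int)) from rfl, loopA_eq ts fns 0 (by simpa using hlen)]
  rw [loopB_eq]
  have hsnd : (fns.zip ts).map Prod.snd = ts := List.map_snd_zip hlen
  have key : ∀ c, (classify_risk c = "High" ↔ classify_rank c = 0) ∧
      (classify_risk c = "Medium" ↔ classify_rank c = 1) ∧
      (classify_risk c = "Low" ↔ classify_rank c = 2) ∧
      (classify_risk c = "No Risk Detected" ↔ classify_rank c = 3) := by
    intro c
    rcases corr c with ⟨h1, h2⟩ | ⟨h1, h2⟩ | ⟨h1, h2⟩ | ⟨h1, h2⟩ <;> rw [h1, h2] <;>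
      refine ⟨⟨?_, ?_⟩, ⟨?_, ?_⟩, ⟨?_, ?_⟩, ⟨?_, ?_⟩⟩ <;> intro h <;> simp_all
  refine Prod.ext ?_ ?_
  · dsimp only
    rw [List.drop_zero, List.zip_map_right, List.map_map]
    exact congrArg _ (List.map_congr_left (fun p _ => rowEq p))
  · dsimp only
    rw [hsnd]
    rw [count_corr "Low" 2 (fun c => (key c).2.2.1) ts, count_corr "Medium" 1 (fun c => (key c).2.1) ts,
        count_corr "High" 0 (fun c => (key c).1) ts, count_corr "No Risk Detected" 3 (fun c => (key c).2.2.2) ts]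
    rfl
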